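-- pv_equiv track=rewrite | github.com/INK-USC/MACROSCORE | flair_eval.py | iob_to_chunk
-- ===== SOURCE A (Python) =====
-- def iob_to_chunk(labels):
--     all_chunks, curr_chunk = [], ()
--     in_ent = False
--     for i in range(len(labels)+1):
--         if i == len(labels):
--             if in_ent:
--                 curr_chunk += (i-1,)
--                 all_chunks.append(curr_chunk)
--                 curr_chunk = ()
--                 in_ent = False
--             break
--         if labels[i][0] == "I":
--             continue
--         elif labels[i][0] == "O":
--             if in_ent:
--                 curr_chunk += (i-1,)
--                 all_chunks.append(curr_chunk)
--                 curr_chunk = ()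
--                 in_ent = False
--         elif labels[i][0] == "B":
--             if in_ent:
--                 curr_chunk += (i-1,)
--                 all_chunks.append(curr_chunk)
--                 curr_chunk = ()
--                 in_ent = False
--             curr_chunk = (labels[i].split('-')[1], i)
--             in_ent = True
--     return all_chunks
-- ===== SOURCE B (Python) =====
-- def iob_to_chunk(labels):
--     chunks = []
--     i, n = 0, len(labels)
--     while i < n:
--         if labels[i][0] == "B":
--             typ = labels[i].split('-')[1]
--             j = i + 1
--             while j < n and labels[j][0] not in ("O", "B"):
--                 j += 1
--             chunks.append((typ, i, j - 1))
--             i = j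
--         else:
--             i += 1
--     return chunks
-- ===== Notes on version B (the rewrite author's own statement) =====
-- stated objective: simpler
-- what changed: Replaces the sentinel-index (len+1) pass with an in_ent flag and growing tuple by an index-driven scan: on each 'B' an inner while consumes the following I-run and the chunk is emitted at once, so no flag, no sentinel and no end-of-loop flush are needed.
import Mathlib
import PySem

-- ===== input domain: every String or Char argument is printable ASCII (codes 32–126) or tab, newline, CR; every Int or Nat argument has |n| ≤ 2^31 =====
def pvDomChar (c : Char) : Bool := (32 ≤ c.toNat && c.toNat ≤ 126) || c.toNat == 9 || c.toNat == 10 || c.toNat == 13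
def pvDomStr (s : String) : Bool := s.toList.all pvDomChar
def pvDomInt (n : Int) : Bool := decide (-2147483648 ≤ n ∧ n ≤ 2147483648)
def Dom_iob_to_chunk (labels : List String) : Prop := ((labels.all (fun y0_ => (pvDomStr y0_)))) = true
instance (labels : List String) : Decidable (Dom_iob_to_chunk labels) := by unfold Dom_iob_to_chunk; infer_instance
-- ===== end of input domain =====

-- B replaces A's sentinel pass (range(len+1), in_ent flag, growing tuple) by an index scan that,
-- at each 'B', consumes the following I-run with an inner loop and emits the chunk at once (objective: simpler).

-- labels[i].split('-')[1] (both Pythons compute exactly this on a 'B' label; IndexError inputs are outside Pre_)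
def pvTypOf (s : String) : String := (((PySem.Str.split? s "-").getD []).getD 1 "")

-- ===== PORT A =====
-- one iteration of A's for-loop body for i < len(labels); state = (all_chunks, curr_chunk/in_ent as an Option)
def pvStepA (labels : List String) (st : List (String × Int × Int) × Option (String × Int)) (i : Nat) :
    List (String × Int × Int) × Option (String × Int) :=
  match (labels.getD i "").toList with
  | [] => st  -- labels[i][0] raises IndexError in Python; such inputs are excluded by Pre_
  | c :: _ =>
    if c = 'I' then st
    else if c = 'O' then
      match st.2 with
      | some (t, s) => (st.1 ++ [(t, s, (i : Int) - 1)], none)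
      | none => st
    else if c = 'B' then
      match st.2 with
      | some (t, s) => (st.1 ++ [(t, s, (i : Int) - 1)], some (pvTypOf (labels.getD i ""), (i : Int)))
      | none => (st.1, some (pvTypOf (labels.getD i ""), (i : Int)))
    else st

-- the i == len(labels) iteration of A's loop (the final flush before break)
def pvFinishA (n : Nat) (st : List (String × Int × Int) × Option (String × Int)) :
    List (String × Int × Int) :=
  match st.2 with
  | some (t, s) => st.1 ++ [(t, s, (n : Int) - 1)]
  | none => st.1

def iob_to_chunk (labels : List String) : List (String × Int × Int) :=
  pvFinishA labels.length
    ((List.range labels.length).foldl (pvStepA labels) ([], none))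

-- ===== PORT B =====
-- inner while loop: advance j while j < n and labels[j][0] not in ("O","B")
def pvFindEnd (labels : List String) (n j : Nat) : Nat :=
  if _h : j < n then
    match (labels.getD j "").toList with
    | [] => j  -- labels[j][0] raises IndexError in Python; excluded by Pre_
    | c :: _ => if c = 'O' ∨ c = 'B' then j else pvFindEnd labels n (j + 1)
  else j
termination_by n - j
decreasing_by exact Nat.sub_succ_lt_self n j _h

theorem pvFindEnd_ge (labels : List String) (n j : Nat) : j ≤ pvFindEnd labels n j := by
  unfold pvFindEnd
  split
  · split
    · exact le_refl j
    · split
      · exact le_refl j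
      · exact le_trans (Nat.le_succ j) (pvFindEnd_ge labels n (j + 1))
  · exact le_refl j
termination_by n - j

-- outer while loop over index i
def pvGoB (labels : List String) (n i : Nat) : List (String × Int × Int) :=
  if _h : i < n then
    match (labels.getD i "").toList with
    | [] => pvGoB labels n (i + 1)  -- labels[i][0] raises IndexError in Python; excluded by Pre_
    | c :: _ =>
      if c = 'B' then
        let j := pvFindEnd labels n (i + 1)
        (pvTypOf (labels.getD i ""), (i : Int), (j : Int) - 1) :: pvGoB labels n j
      else pvGoB labels n (i + 1)
  else []
termination_by n - i
decreasing_by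
  all_goals first
    | exact Nat.sub_succ_lt_self n i _h
    | exact Nat.sub_lt_sub_left _h (Nat.lt_of_lt_of_le (Nat.lt_succ_self i) (pvFindEnd_ge labels n (i + 1)))

def iob_to_chunk_alt (labels : List String) : List (String × Int × Int) :=
  pvGoB labels labels.length 0

-- ===== PRECONDITION & SPEC =====
-- Pre_ excludes exactly the inputs where A raises IndexError: an empty-string label (labels[i][0])
-- or a label starting with 'B' that contains no '-' (labels[i].split('-')[1]). B raises there too.
def Pre_iob_to_chunk (labels : List String) : Prop :=
  ∀ s ∈ labels, s.toList ≠ [] ∧ (s.toList.head? = some 'B' → '-' ∈ s.toList)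
instance (labels : List String) : Decidable (Pre_iob_to_chunk labels) := by
  unfold Pre_iob_to_chunk; infer_instance

def pvWitness_iob_to_chunk : List String := ["B-a", "I", "O"]

def Spec_iob_to_chunk (labels : List String) (out : List (String × Int × Int)) : Prop := out = iob_to_chunk_alt labels
instance (labels : List String) (out : List (String × Int × Int)) : Decidable (Spec_iob_to_chunk labels out) := by unfold Spec_iob_to_chunk; infer_instance

-- ===== CLAIM (what is proved, stated in full; the proofs are below) =====
def Claim_equal_iob_to_chunk : Prop := ∀ (labels : List String), Dom_iob_to_chunk labels → Pre_iob_to_chunk labels → Spec_iob_to_chunk labels (iob_to_chunk labels)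

-- ===== LEMMAS AND PROOFS =====

-- the main invariant: running A's remaining loop (indices i..n-1 plus the flush) from either
-- loop state produces exactly what B's scan produces from index i.
theorem pv_main (labels : List String)
    (hpre : ∀ s ∈ labels, s.toList ≠ []) :
    ∀ k i, labels.length - i ≤ k → i ≤ labels.length →
      ((∀ all, pvFinishA labels.length
          ((List.range' i (labels.length - i)).foldl (pvStepA labels) (all, none))
          = all ++ pvGoB labels labels.length i)
       ∧ (∀ all t s, pvFinishA labels.length
          ((List.range' i (labels.length - i)).foldl (pvStepA labels) (all, some (t, s)))
          = all ++ (t, s, ((pvFindEnd labels labels.length i : Int)) - 1)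
              :: pvGoB labels labels.length (pvFindEnd labels labels.length i))) := by
  intro k
  induction k with
  | zero =>
    intro i hk hi
    have hin : i = labels.length := by omega
    subst hin
    refine ⟨fun all => ?_, fun all t s => ?_⟩
    · unfold pvGoB
      simp [pvFinishA]
    · unfold pvGoB pvFindEnd
      simp [pvFinishA]
  | succ k ih =>
    intro i hk hi
    by_cases hlt : i < labels.length
    · have hrange : List.range' i (labels.length - i)
          = i :: List.range' (i + 1) (labels.length - (i + 1)) := by
        have h1 : labels.length - i = (labels.length - (i + 1)) + 1 := by omega
        rw [h1, List.range'_succ]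
      have hmem : labels.getD i "" ∈ labels := by
        rw [List.getD_eq_getElem?_getD, List.getElem?_eq_getElem hlt]
        exact List.getElem_mem hlt
      obtain ⟨c, rest, hc⟩ : ∃ c rest, (labels.getD i "").toList = c :: rest := by
        cases h : (labels.getD i "").toList with
        | nil => exact absurd h (hpre _ hmem)
        | cons c rest => exact ⟨c, rest, rfl⟩
      have ih' := ih (i + 1) (by omega) (by omega)
      refine ⟨fun all => ?_, fun all t s => ?_⟩
      · rw [hrange, List.foldl_cons]
        conv_rhs => rw [pvGoB.eq_def]
        simp only [hlt, dif_pos, hc]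
        by_cases hB : c = 'B'
        · have hstep : pvStepA labels (all, none) i
              = (all, some (pvTypOf (labels.getD i ""), (i : Int))) := by
            unfold pvStepA; rw [hc]; simp [hB]
          rw [hstep, ih'.2 all (pvTypOf (labels.getD i "")) (i : Int)]
          simp only [if_pos hB]
        · by_cases hO : c = 'O'
          · have hstep : pvStepA labels (all, none) i = (all, none) := by
              unfold pvStepA; rw [hc]; simp [hO]
            rw [hstep, ih'.1 all]
            simp only [if_neg hB]
          · have hstep : pvStepA labels (all, none) i = (all, none) := by
              unfold pvStepA; rw [hc]
              by_cases hI : c = 'I' <;> simp [hI, hO, hB]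
            rw [hstep, ih'.1 all]
            simp only [if_neg hB]
      · rw [hrange, List.foldl_cons]
        conv_rhs => rw [pvFindEnd.eq_def]
        simp only [hlt, dif_pos, hc]
        by_cases hOB : c = 'O' ∨ c = 'B'
        · rw [if_pos hOB]
          rcases hOB with hO | hB
          · have hstep : pvStepA labels (all, some (t, s)) i
                = (all ++ [(t, s, (i : Int) - 1)], none) := by
              unfold pvStepA; rw [hc]; simp [hO]
            rw [hstep, ih'.1 (all ++ [(t, s, (i : Int) - 1)])]
            conv_rhs => rw [pvGoB.eq_def]
            simp only [hlt, dif_pos, hc, if_neg (show ¬ ('O' = 'B') by decide), hO]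
            simp
          · have hstep : pvStepA labels (all, some (t, s)) i
                = (all ++ [(t, s, (i : Int) - 1)], some (pvTypOf (labels.getD i ""), (i : Int))) := by
              unfold pvStepA; rw [hc]; simp [hB]
            rw [hstep, ih'.2 (all ++ [(t, s, (i : Int) - 1)]) (pvTypOf (labels.getD i "")) (i : Int)]
            conv_rhs => rw [pvGoB.eq_def]
            simp only [hlt, dif_pos, hc, hB]
            simp
        · rw [if_neg hOB]
          have hO : ¬ c = 'O' := fun h => hOB (Or.inl h)
          have hB : ¬ c = 'B' := fun h => hOB (Or.inr h)
          have hstep : pvStepA labels (all, some (t, s)) i = (all, some (t, s)) := by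
            unfold pvStepA; rw [hc]
            by_cases hI : c = 'I' <;> simp [hI, hO, hB]
          rw [hstep]
          exact ih'.2 all t s
    · have hin : i = labels.length := by omega
      subst hin
      refine ⟨fun all => ?_, fun all t s => ?_⟩
      · rw [pvGoB.eq_def]
        simp [pvFinishA]
      · rw [pvGoB.eq_def, pvFindEnd.eq_def]
        simp [pvFinishA]

-- ===== VERDICT (by name: the statement is the Claim_ definition above) =====
theorem iob_to_chunk_spec : Claim_equal_iob_to_chunk := by
  intro labels _hdom hpre
  unfold Spec_iob_to_chunk iob_to_chunk iob_to_chunk_alt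
  have h := (pv_main labels (fun s hs => (hpre s hs).1) labels.length 0
      (by omega) (by omega)).1 []
  rw [List.range_eq_range']
  simpa using h
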